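-- pv_equiv track=rewrite | github.com/MsKat04/SkillboxPython | buns/mod_3(12.10)/task9.py | robot
-- ===== SOURCE A (Python) =====
-- def robot(n):
--     x, y = 0, 0
--     k = 0
--     size = 1
--     while k < n:
--
--         for i in range(size):
--             x -= 1
--             y -= 1
--             k += 1
--             if k == n:
--                 return x, y
--         size += 1
--
--         for i in range(size):
--             x += 1
--             #y += 1
--             k += 1
--             if k == n:
--                 return x, y
--
--         for i in range(size):
--             k += 1
--             y += 1
--             if k == n:
--                 return x, y
--
--         size += 1
-- ===== SOURCE B (Python) =====
-- def robot(n):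
--     # closed form: round r contributes 6r+5 steps; T(r)=3r^2+2r steps precede round r.
--     # binary-search the round index, then compute coordinates arithmetically.
--     if n <= 0:
--         return None
--     lo, hi = 0, n  # invariant: T(lo) <= n-1 < T(hi)
--     while hi - lo > 1:
--         mid = (lo + hi) // 2
--         if 3 * mid * mid + 2 * mid <= n - 1:
--             lo = mid
--         else:
--             hi = mid
--     r = lo
--     off = n - (3 * r * r + 2 * r)
--     s1 = 2 * r + 1
--     if off <= s1:
--         return (r - off, r - off)
--     if off <= s1 + (2 * r + 2):
--         return (r - s1 + (off - s1), r - s1)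
--     return (r + 1, r - s1 + (off - s1 - (2 * r + 2)))
-- ===== Notes on version B (the rewrite author's own statement) =====
-- stated objective: faster
-- what changed: Replaces the step-by-step spiral walk with a binary search for the round index (T(r)=3r^2+2r steps precede round r) and closed-form arithmetic for the coordinates within the final round.
import Mathlib
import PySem

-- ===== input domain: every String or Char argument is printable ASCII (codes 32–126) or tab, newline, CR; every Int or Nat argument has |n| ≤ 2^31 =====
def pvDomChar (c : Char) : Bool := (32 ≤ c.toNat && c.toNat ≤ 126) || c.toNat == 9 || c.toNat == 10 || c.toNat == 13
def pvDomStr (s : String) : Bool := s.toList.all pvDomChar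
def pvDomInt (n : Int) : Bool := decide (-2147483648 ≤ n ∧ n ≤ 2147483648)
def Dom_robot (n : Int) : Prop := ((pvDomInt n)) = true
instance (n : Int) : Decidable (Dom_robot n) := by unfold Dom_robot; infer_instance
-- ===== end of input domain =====

-- B replaces A's step-by-step walk (O(n)) by a binary search for the round index plus
-- closed-form coordinate arithmetic (O(log n)); return values proved identical for all n.

-- ===== PORT A =====
-- for i in range(size): x -= 1; y -= 1; k += 1; if k == n: return x, y
def phase1A : Nat → Int → Int → Int → Int → (Int × Int × Int) ⊕ (Int × Int)
  | 0, x, y, k, _ => .inl (x, y, k)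
  | c + 1, x, y, k, n =>
    let x := x - 1
    let y := y - 1
    let k := k + 1
    if k = n then .inr (x, y) else phase1A c x y k n

-- for i in range(size): x += 1; k += 1; if k == n: return x, y
def phase2A : Nat → Int → Int → Int → Int → (Int × Int × Int) ⊕ (Int × Int)
  | 0, x, y, k, _ => .inl (x, y, k)
  | c + 1, x, y, k, n =>
    let x := x + 1
    let k := k + 1
    if k = n then .inr (x, y) else phase2A c x y k n

-- for i in range(size): k += 1; y += 1; if k == n: return x, y
def phase3A : Nat → Int → Int → Int → Int → (Int × Int × Int) ⊕ (Int × Int)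
  | 0, x, y, k, _ => .inl (x, y, k)
  | c + 1, x, y, k, n =>
    let k := k + 1
    let y := y + 1
    if k = n then .inr (x, y) else phase3A c x y k n

-- the while-loop; fuel only makes it total (one unit per iteration, n.toNat + 1 always suffices)
def loopA : Nat → Int → Int → Int → Int → Int → Option (Int × Int)
  | 0, _, _, _, _, _ => none
  | fuel + 1, n, x, y, k, size =>
    if k < n then
      match phase1A size.toNat x y k n with
      | .inr res => some res
      | .inl (x, y, k) =>
        let size := size + 1
        match phase2A size.toNat x y k n with
        | .inr res => some res
        | .inl (x, y, k) =>
          match phase3A size.toNat x y k n with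
          | .inr res => some res
          | .inl (x, y, k) => loopA fuel n x y k (size + 1)
    else none

def robot (n : Int) : Option (Int × Int) := loopA (n.toNat + 1) n 0 0 0 1

-- ===== PORT B =====
-- while hi - lo > 1: mid = (lo+hi)//2; if 3*mid*mid+2*mid <= n-1: lo = mid else: hi = mid
-- fuel only makes the loop total (the gap halves; n.toNat units always suffice)
def bsearchB : Nat → Int → Int → Int → Int
  | 0, _, lo, _ => lo
  | fuel + 1, n, lo, hi =>
    if hi - lo > 1 then
      let mid := PySem.Int.floordiv (lo + hi) 2
      if 3 * mid * mid + 2 * mid ≤ n - 1 then bsearchB fuel n mid hi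
      else bsearchB fuel n lo mid
    else lo

def robot_alt (n : Int) : Option (Int × Int) :=
  if n ≤ 0 then none
  else
    let r := bsearchB n.toNat n 0 n
    let off := n - (3 * r * r + 2 * r)
    let s1 := 2 * r + 1
    if off ≤ s1 then some (r - off, r - off)
    else if off ≤ s1 + (2 * r + 2) then some (r - s1 + (off - s1), r - s1)
    else some (r + 1, r - s1 + (off - s1 - (2 * r + 2)))

-- ===== PRECONDITION & SPEC =====
def Spec_robot (n : Int) (out : Option (Int × Int)) : Prop := out = robot_alt n
instance (n : Int) (out : Option (Int × Int)) : Decidable (Spec_robot n out) := by unfold Spec_robot; infer_instance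

-- ===== CLAIM (what is proved, stated in full; the proofs are below) =====
def Claim_equal_robot : Prop := ∀ (n : Int), Dom_robot n → Spec_robot n (robot n)

-- ===== LEMMAS AND PROOFS =====

-- total number of steps before round r begins
def pvT (r : Int) : Int := 3 * r * r + 2 * r

-- position after step n, given that step n lies in round r (shape of robot_alt's tail)
def pvAns (n r : Int) : Option (Int × Int) :=
  let off := n - (3 * r * r + 2 * r)
  let s1 := 2 * r + 1
  if off ≤ s1 then some (r - off, r - off)
  else if off ≤ s1 + (2 * r + 2) then some (r - s1 + (off - s1), r - s1)
  else some (r + 1, r - s1 + (off - s1 - (2 * r + 2)))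

lemma pvT_mono {a b : Int} (h0 : 0 ≤ a) (hab : a ≤ b) : pvT a ≤ pvT b := by
  unfold pvT; nlinarith

lemma phase1A_eq (c : Nat) : ∀ (x y k n : Int), k < n →
    phase1A c x y k n =
      if n ≤ k + c then .inr (x - (n - k), y - (n - k)) else .inl (x - c, y - c, k + c) := by
  induction c with
  | zero => intro x y k n h; simp [phase1A]; omega
  | succ c ih =>
    intro x y k n h
    simp only [phase1A]
    by_cases hk : k + 1 = n
    · rw [if_pos hk, if_pos (show n ≤ k + ((c + 1 : Nat) : Int) by push_cast; omega)]
      simp only [Sum.inr.injEq, Prod.mk.injEq]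
      omega
    · rw [if_neg hk, ih _ _ _ _ (by omega)]
      by_cases h2 : n ≤ k + 1 + (c : Int)
      · rw [if_pos h2, if_pos (show n ≤ k + ((c + 1 : Nat) : Int) by push_cast; omega)]
        simp only [Sum.inr.injEq, Prod.mk.injEq]
        omega
      · rw [if_neg h2, if_neg (show ¬ n ≤ k + ((c + 1 : Nat) : Int) by push_cast; omega)]
        simp only [Sum.inl.injEq, Prod.mk.injEq]
        push_cast
        omega

lemma phase2A_eq (c : Nat) : ∀ (x y k n : Int), k < n →
    phase2A c x y k n =
      if n ≤ k + c then .inr (x + (n - k), y) else .inl (x + c, y, k + c) := by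
  induction c with
  | zero => intro x y k n h; simp [phase2A]; omega
  | succ c ih =>
    intro x y k n h
    simp only [phase2A]
    by_cases hk : k + 1 = n
    · rw [if_pos hk, if_pos (show n ≤ k + ((c + 1 : Nat) : Int) by push_cast; omega)]
      simp only [Sum.inr.injEq, Prod.mk.injEq, and_true]
      omega
    · rw [if_neg hk, ih _ _ _ _ (by omega)]
      by_cases h2 : n ≤ k + 1 + (c : Int)
      · rw [if_pos h2, if_pos (show n ≤ k + ((c + 1 : Nat) : Int) by push_cast; omega)]
        simp only [Sum.inr.injEq, Prod.mk.injEq, and_true]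
        omega
      · rw [if_neg h2, if_neg (show ¬ n ≤ k + ((c + 1 : Nat) : Int) by push_cast; omega)]
        simp only [Sum.inl.injEq, Prod.mk.injEq, true_and]
        push_cast
        omega

lemma phase3A_eq (c : Nat) : ∀ (x y k n : Int), k < n →
    phase3A c x y k n =
      if n ≤ k + c then .inr (x, y + (n - k)) else .inl (x, y + c, k + c) := by
  induction c with
  | zero => intro x y k n h; simp [phase3A]; omega
  | succ c ih =>
    intro x y k n h
    simp only [phase3A]
    by_cases hk : k + 1 = n
    · rw [if_pos hk, if_pos (show n ≤ k + ((c + 1 : Nat) : Int) by push_cast; omega)]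
      simp only [Sum.inr.injEq, Prod.mk.injEq, true_and]
      omega
    · rw [if_neg hk, ih _ _ _ _ (by omega)]
      by_cases h2 : n ≤ k + 1 + (c : Int)
      · rw [if_pos h2, if_pos (show n ≤ k + ((c + 1 : Nat) : Int) by push_cast; omega)]
        simp only [Sum.inr.injEq, Prod.mk.injEq, true_and]
        omega
      · rw [if_neg h2, if_neg (show ¬ n ≤ k + ((c + 1 : Nat) : Int) by push_cast; omega)]
        simp only [Sum.inl.injEq, Prod.mk.injEq, true_and]
        push_cast
        omega

lemma loopA_spec : ∀ (fuel : Nat) (r n : Int), 0 ≤ r → pvT r < n → n ≤ pvT r + fuel →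
    ∃ R, 0 ≤ R ∧ pvT R < n ∧ n ≤ pvT (R + 1) ∧
      loopA fuel n r r (pvT r) (2 * r + 1) = pvAns n R := by
  intro fuel
  induction fuel with
  | zero => intro r n h0 h1 h2; simp at h2; omega
  | succ fuel ih =>
    intro r n h0 h1 h2
    have hsz1 : ((2 * r + 1).toNat : Int) = 2 * r + 1 := by omega
    have hsz2 : ((2 * r + 1 + 1).toNat : Int) = 2 * r + 2 := by omega
    have hTs : pvT (r + 1) = pvT r + (2 * r + 1) + (2 * r + 2) + (2 * r + 2) := by
      unfold pvT; ring
    simp only [loopA, if_pos h1]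
    rw [phase1A_eq _ _ _ _ _ h1, hsz1]
    by_cases hc1 : n ≤ pvT r + (2 * r + 1)
    · -- returns inside phase 1
      refine ⟨r, h0, h1, by omega, ?_⟩
      rw [if_pos hc1]
      dsimp only []
      unfold pvAns pvT at *
      rw [if_pos (by linarith)]
    · rw [if_neg hc1]
      dsimp only []
      have hk2 : pvT r + (2 * r + 1) < n := by omega
      rw [phase2A_eq _ _ _ _ _ hk2, hsz2]
      by_cases hc2 : n ≤ pvT r + (2 * r + 1) + (2 * r + 2)
      · refine ⟨r, h0, h1, by omega, ?_⟩
        rw [if_pos hc2]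
        dsimp only []
        unfold pvAns pvT at *
        rw [if_neg (by linarith), if_pos (by linarith)]
        simp only [Option.some.injEq, Prod.mk.injEq, and_true]
        ring
      · rw [if_neg hc2]
        dsimp only []
        have hk3 : pvT r + (2 * r + 1) + (2 * r + 2) < n := by omega
        rw [phase3A_eq _ _ _ _ _ hk3, hsz2]
        by_cases hc3 : n ≤ pvT r + (2 * r + 1) + (2 * r + 2) + (2 * r + 2)
        · refine ⟨r, h0, h1, by omega, ?_⟩
          rw [if_pos hc3]
          dsimp only []
          unfold pvAns pvT at *
          rw [if_neg (by linarith), if_neg (by linarith)]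
          simp only [Option.some.injEq, Prod.mk.injEq]
          constructor <;> ring
        · rw [if_neg hc3]
          dsimp only []
          have h1' : pvT (r + 1) < n := by omega
          have h2' : n ≤ pvT (r + 1) + fuel := by push_cast at h2 ⊢; omega
          obtain ⟨R, hR0, hR1, hR2, hR3⟩ := ih (r + 1) n (by omega) h1' h2'
          refine ⟨R, hR0, hR1, hR2, ?_⟩
          rw [← hR3]
          have e1 : r - (2 * r + 1) + (2 * r + 2) = r + 1 := by ring
          have e3 : pvT r + (2 * r + 1) + (2 * r + 2) + (2 * r + 2) = pvT (r + 1) := hTs.symm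
          have e4 : 2 * r + 1 + 1 + 1 = 2 * (r + 1) + 1 := by ring
          rw [e1, e3, e4]

lemma bsearchB_spec : ∀ (fuel : Nat) (n lo hi : Int), 0 ≤ lo → lo < hi →
    pvT lo ≤ n - 1 → n - 1 < pvT hi → hi - lo ≤ 2 ^ fuel →
    0 ≤ bsearchB fuel n lo hi ∧ pvT (bsearchB fuel n lo hi) ≤ n - 1 ∧
      n - 1 < pvT (bsearchB fuel n lo hi + 1) := by
  intro fuel
  induction fuel with
  | zero =>
    intro n lo hi h0 hlh hl hh hf
    have hhi : hi = lo + 1 := by norm_num at hf; omega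
    subst hhi
    exact ⟨h0, hl, hh⟩
  | succ fuel ih =>
    intro n lo hi h0 hlh hl hh hf
    simp only [bsearchB]
    by_cases hgap : hi - lo > 1
    · rw [if_pos hgap]
      have hmid := PySem.Int.floordiv_two_mid_bounds (le_of_lt hlh)
      set mid := PySem.Int.floordiv (lo + hi) 2 with hm
      have hdiv : mid = (lo + hi) / 2 := by
        rw [hm, PySem.Int.floordiv_eq_ediv_of_pos (by omega)]
      have hb1 : lo < mid := by omega
      have hb2 : mid < hi := by omega
      have hpow : (2 : Int) ^ (fuel + 1) = 2 ^ fuel + 2 ^ fuel := by ring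
      have hpf : hi - lo ≤ 2 ^ fuel + 2 ^ fuel := by rw [← hpow]; exact_mod_cast hf
      have hhalf1 : mid - lo ≤ 2 ^ fuel := by omega
      have hhalf2 : hi - mid ≤ 2 ^ fuel := by omega
      by_cases hc : 3 * mid * mid + 2 * mid ≤ n - 1
      · rw [if_pos hc]
        exact ih n mid hi (by omega) hb2 (by unfold pvT; linarith) hh hhalf2
      · rw [if_neg hc]
        exact ih n lo mid h0 hb1 hl (by unfold pvT; omega) hhalf1
    · rw [if_neg hgap]
      have hhi : hi = lo + 1 := by omega
      subst hhi
      exact ⟨h0, hl, hh⟩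

lemma round_unique {n a b : Int} (ha0 : 0 ≤ a) (hb0 : 0 ≤ b)
    (ha1 : pvT a < n) (ha2 : n ≤ pvT (a + 1))
    (hb1 : pvT b < n) (hb2 : n ≤ pvT (b + 1)) : a = b := by
  by_contra hne
  rcases lt_or_gt_of_ne hne with h | h
  · have := pvT_mono (show (0:Int) ≤ a + 1 by omega) (show a + 1 ≤ b by omega); omega
  · have := pvT_mono (show (0:Int) ≤ b + 1 by omega) (show b + 1 ≤ a by omega); omega

-- ===== VERDICT (by name: the statement is the Claim_ definition above) =====
theorem robot_spec : Claim_equal_robot := by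
  intro n _
  unfold Spec_robot robot robot_alt
  by_cases hn : n ≤ 0
  · rw [if_pos hn]
    have hz : n.toNat = 0 := by omega
    rw [hz]
    have h1 : ¬ ((0 : Int) < n) := by omega
    simp [loopA, h1]
  · rw [if_neg hn]
    have hn1 : 1 ≤ n := by omega
    have hA := loopA_spec (n.toNat + 1) 0 n le_rfl (by unfold pvT; omega)
      (by unfold pvT; push_cast; omega)
    obtain ⟨R, hR0, hR1, hR2, hR3⟩ := hA
    have hinit : loopA (n.toNat + 1) n 0 0 0 1 = pvAns n R := by
      have hz : pvT 0 = 0 := by unfold pvT; ring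
      have := hR3
      rw [hz] at this
      simpa using this
    rw [hinit]
    have hpow : n ≤ 2 ^ n.toNat := by
      have h1 : n.toNat < 2 ^ n.toNat := Nat.lt_two_pow_self
      have h2 : (n.toNat : Int) = n := by omega
      calc n = (n.toNat : Int) := h2.symm
        _ ≤ ((2 ^ n.toNat : Nat) : Int) := by exact_mod_cast h1.le
        _ = 2 ^ n.toNat := by push_cast; ring
    have hB := bsearchB_spec n.toNat n 0 n le_rfl (by omega)
      (by unfold pvT; omega) (by unfold pvT; nlinarith) (by omega)
    set r := bsearchB n.toNat n 0 n with hr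
    obtain ⟨hr0, hr1, hr2⟩ := hB
    have hRr : R = r := round_unique hR0 hr0 hR1 hR2 (by omega) (by omega)
    rw [hRr]
    rfl
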